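-- pv_equiv track=rewrite | github.com/nkansal96/alohamora | tests/evaluator/cluster/test_cluster.py | is_one_to_one
-- ===== SOURCE A (Python) =====
-- def is_one_to_one(a, b) -> bool:
--     if len(a) != len(b):
--         return False
--
--     mapping = {}
--     for (x, y) in zip(a, b):
--         if x in mapping and mapping[x] != y:
--             return False
--         if x not in mapping:
--             mapping[x] = y
--
--     return True
-- ===== SOURCE B (Python) =====
-- def is_one_to_one(a, b) -> bool:
--     if len(a) != len(b):
--         return False
--     pairs = list(zip(a, b))
--     while pairs:
--         (x, y) = pairs[0]
--         if any(u == x and v != y for (u, v) in pairs):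
--             return False
--         pairs = [(u, v) for (u, v) in pairs if u != x]
--     return True
-- ===== Notes on version B (the rewrite author's own statement) =====
-- stated objective: alternative
-- what changed: Drops the dict entirely: B repeatedly takes the first remaining key, checks by a linear scan that every pair with that key carries the same value, then deletes the whole key group by filtering, until the list is empty (O(k*n) group elimination instead of A's O(n) hash-map scan).
import Mathlib
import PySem

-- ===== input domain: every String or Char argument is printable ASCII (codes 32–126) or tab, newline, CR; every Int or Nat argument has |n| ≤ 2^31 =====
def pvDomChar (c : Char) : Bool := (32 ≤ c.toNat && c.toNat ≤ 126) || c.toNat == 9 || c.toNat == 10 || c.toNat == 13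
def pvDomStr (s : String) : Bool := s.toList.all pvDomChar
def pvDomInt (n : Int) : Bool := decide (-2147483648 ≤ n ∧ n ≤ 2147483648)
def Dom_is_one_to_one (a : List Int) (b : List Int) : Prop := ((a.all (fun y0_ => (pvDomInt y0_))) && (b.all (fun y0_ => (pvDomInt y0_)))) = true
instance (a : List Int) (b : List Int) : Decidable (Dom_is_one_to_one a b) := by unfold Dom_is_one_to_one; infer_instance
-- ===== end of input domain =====

-- B drops A's dict entirely: it repeatedly scans for conflicts on the first remaining key and deletes that whole key group by filtering.

-- ===== PORT A =====
def isOneGoA (m : PySem.Dict Int Int) : List (Int × Int) → Bool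
  | [] => true
  | (x, y) :: rest =>
    if (m.contains x && !(m.getD x 0 == y)) then false
    else if !(m.contains x) then isOneGoA (m.insert x y) rest
    else isOneGoA m rest

def is_one_to_one (a : List Int) (b : List Int) : Bool :=
  if a.length != b.length then false
  else isOneGoA PySem.Dict.empty (a.zip b)

-- ===== PORT B =====
def isOneGoB : List (Int × Int) → Bool
  | [] => true
  | (x, y) :: rest =>
    if ((x, y) :: rest).any (fun p => p.1 == x && !(p.2 == y)) then false
    else isOneGoB (((x, y) :: rest).filter (fun p => !(p.1 == x)))
termination_by l => l.length
decreasing_by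
  simp only [List.filter]
  simp only [show ((x, y).1 == x) = true by simp, Bool.not_true]
  exact Nat.lt_succ_of_le (List.length_filter_le _ _)

def is_one_to_one_alt (a : List Int) (b : List Int) : Bool :=
  if a.length != b.length then false
  else isOneGoB (a.zip b)

-- ===== PRECONDITION & SPEC =====
def Spec_is_one_to_one (a : List Int) (b : List Int) (out : Bool) : Prop := out = is_one_to_one_alt a b
instance (a : List Int) (b : List Int) (out : Bool) : Decidable (Spec_is_one_to_one a b out) := by unfold Spec_is_one_to_one; infer_instance

-- ===== CLAIM =====
def Claim_equal_is_one_to_one : Prop := ∀ (a : List Int) (b : List Int), Dom_is_one_to_one a b → Spec_is_one_to_one a b (is_one_to_one a b)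

-- ===== LEMMAS AND PROOFS =====

-- the common characterisation: the pair list is a (partial) function graph
def Func (l : List (Int × Int)) : Prop :=
  ∀ p ∈ l, ∀ q ∈ l, p.1 = q.1 → p.2 = q.2

lemma func_cons_iff (x y : Int) (rest : List (Int × Int)) :
    Func ((x, y) :: rest) ↔ (∀ q ∈ rest, q.1 = x → q.2 = y) ∧ Func rest := by
  constructor
  · intro h
    refine ⟨fun q hq hqx => ?_, fun p hp q hq hpq => h p (.tail _ hp) q (.tail _ hq) hpq⟩
    exact h q (.tail _ hq) (x, y) (.head _) hqx
  · rintro ⟨hc, hr⟩ p hp q hq hpq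
    rcases List.mem_cons.mp hp with rfl | hp <;> rcases List.mem_cons.mp hq with rfl | hq
    · rfl
    · exact (hc q hq hpq.symm).symm
    · exact hc p hp hpq
    · exact hr p hp q hq hpq

lemma func_sublist {l l' : List (Int × Int)} (hs : l' ⊆ l) (h : Func l) : Func l' :=
  fun p hp q hq hpq => h p (hs hp) q (hs hq) hpq

lemma isOneGoB_iff (l : List (Int × Int)) : isOneGoB l = true ↔ Func l := by
  induction l using isOneGoB.induct with
  | case1 =>
    constructor
    · intro _ p hp _ _ _; exact absurd hp (by simp)
    · intro _; simp [isOneGoB]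
  | case2 x y rest hany =>
    rw [isOneGoB, if_pos hany]
    obtain ⟨p, hp, hcond⟩ := List.any_eq_true.mp hany
    have hpx : p.1 = x := by
      have := Bool.and_elim_left hcond; simpa using this
    have hpy : ¬ p.2 = y := by
      have := Bool.and_elim_right hcond; simpa using this
    constructor
    · intro h; exact absurd h (by simp)
    · intro h
      exact absurd (h p hp (x, y) (.head _) hpx) hpy
  | case3 x y rest hany ih =>
    rw [isOneGoB, if_neg hany, ih]
    have hno : ∀ p ∈ (x, y) :: rest, p.1 = x → p.2 = y := by
      intro p hp hpx
      have := List.any_eq_false.mp (Bool.eq_false_iff.mpr hany) p hp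
      simpa [hpx] using this
    constructor
    · intro hf p hp q hq hpq
      by_cases hpx : p.1 = x
      · rw [hno p hp hpx, hno q hq (hpq ▸ hpx)]
      · have hqx : q.1 ≠ x := hpq ▸ hpx
        exact hf p (List.mem_filter.mpr ⟨hp, by simp [hpx]⟩)
          q (List.mem_filter.mpr ⟨hq, by simp [hqx]⟩) hpq
    · intro hf
      exact func_sublist (List.filter_sublist).subset hf

lemma isOneGoA_iff (l : List (Int × Int)) (m : PySem.Dict Int Int) :
    isOneGoA m l = true ↔ ((∀ p ∈ l, ∀ v, m.get? p.1 = some v → v = p.2) ∧ Func l) := by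
  induction l generalizing m with
  | nil =>
    constructor
    · intro _
      exact ⟨fun p hp => absurd hp (by simp), fun p hp => absurd hp (by simp)⟩
    · intro _; simp [isOneGoA]
  | cons p rest ih =>
    obtain ⟨x, y⟩ := p
    by_cases hc : m.contains x = true
    · have hs : (m.get? x).isSome := by rw [← PySem.Dict.contains_eq_isSome_get?, hc]
      obtain ⟨v, hv⟩ := Option.isSome_iff_exists.mp hs
      have hgetD : m.getD x 0 = v := PySem.Dict.getD_of_get?_eq_some m 0 hv
      by_cases hvy : v = y
      · subst hvy
        rw [show isOneGoA m ((x, v) :: rest) = isOneGoA m rest by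
            simp [isOneGoA, hc, hgetD], ih m, func_cons_iff]
        constructor
        · rintro ⟨hm, hf⟩
          refine ⟨fun q hq v' hv' => ?_, fun q hq hqx => ?_, hf⟩
          · rcases List.mem_cons.mp hq with rfl | hq'
            · rw [hv] at hv'; exact (Option.some.inj hv').symm
            · exact hm q hq' v' hv'
          · exact (hm q hq v (by rw [hqx]; exact hv)).symm
        · rintro ⟨hm, _, hf⟩
          exact ⟨fun q hq v' hv' => hm q (.tail _ hq) v' hv', hf⟩
      · rw [show isOneGoA m ((x, y) :: rest) = false by simp [isOneGoA, hc, hgetD, hvy]]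
        constructor
        · intro h; exact absurd h (by simp)
        · rintro ⟨hm, _⟩
          exact absurd (hm (x, y) (.head _) v hv) hvy
    · have hnone : m.get? x = none := by
        rcases h : m.get? x with _ | v
        · rfl
        · rw [PySem.Dict.contains_eq_isSome_get?, h] at hc; simp at hc
      rw [show isOneGoA m ((x, y) :: rest) = isOneGoA (m.insert x y) rest by
          simp [isOneGoA, hc], ih (m.insert x y), func_cons_iff]
      constructor
      · rintro ⟨hm, hf⟩
        refine ⟨fun q hq v' hv' => ?_, fun q hq hqx => ?_, hf⟩
        · by_cases hqx : q.1 = x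
          · rw [hqx, hnone] at hv'; exact absurd hv' (by simp)
          · rcases List.mem_cons.mp hq with rfl | hq'
            · exact absurd rfl hqx
            · exact hm q hq' v' (by rw [PySem.Dict.get?_insert_of_ne (hne := hqx)]; exact hv')
        · exact (hm q hq y (by rw [hqx, PySem.Dict.get?_insert_self])).symm
      · rintro ⟨hm, hcross, hf⟩
        refine ⟨fun q hq v' hv' => ?_, hf⟩
        by_cases hqx : q.1 = x
        · rw [hqx, PySem.Dict.get?_insert_self] at hv'
          rw [← Option.some.inj hv']
          exact (hcross q hq hqx).symm
        · rw [PySem.Dict.get?_insert_of_ne (hne := hqx)] at hv'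
          exact hm q (.tail _ hq) v' hv'

-- ===== VERDICT =====
theorem is_one_to_one_spec : Claim_equal_is_one_to_one := by
  intro a b _
  unfold Spec_is_one_to_one is_one_to_one is_one_to_one_alt
  split
  · rfl
  · have hA := isOneGoA_iff (a.zip b) PySem.Dict.empty
    have hB := isOneGoB_iff (a.zip b)
    simp only [PySem.Dict.get?_empty] at hA
    apply Bool.eq_iff_iff.mpr
    rw [hA, hB]
    constructor
    · rintro ⟨_, h⟩; exact h
    · intro h; exact ⟨by simp, h⟩
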